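-- pv_equiv track=rewrite | github.com/decordoba/mixed-algorithms | gapsAndRoses.py | solution
-- ===== SOURCE A (Python) =====
-- def solution(P, K):
--     # Return iteration in which we first find a gap of size K
--     n = len(P)
--     ok_land = []
--     for i, p in enumerate(P):
--         # returns 1st rose before and after, and idx after_rose
--         bef, aft, idx = find_idx(p, ok_land, max_num=n)
--         diff_bef = p - bef - 1
--         diff_aft = aft - p - 1
--         if diff_bef == K or diff_aft == K:
--             return i + 1
--         # We can optimize the search if we do not add roses for small gaps
--         if diff_bef + diff_aft >= K:
--             ok_land = ok_land[:idx] + [p] + ok_land[idx:]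
--     return -1
--
-- def find_idx(el, array, max_num):
--     # Binary search (complexity O(log(N))), we return the number
--     # before and after 'el' in 'array', and the index of the larger
--     # number in 'array'. For this to work, 'el' should not be
--     # in 'array', and 'array' must be sorted. For example, el=5,
--     # array=[1,2,4,9,11] returns (4, 9, 3); el=2, array=[4,6,7]
--     # returns (0, 4, 0); el=10, array=[1,5,8,9], max_num=12
--     # returns (9, 13, 4)
--     min_pos = 0
--     max_pos = len(array)
--     pos = 0
--     # Search pos where numbers go from smaller than el to larger than el
--     while max_pos - min_pos > 1:
--         # Assume el not in array => array[pos] can only be > or < el, not =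
--         pos = (max_pos + min_pos) // 2
--         if array[pos] > el:
--             max_pos = pos
--         else:
--             min_pos = pos
--     # These if-else deal with some corner cases in the search
--     if len(array) == 0:
--         prev, nex, idx = 0, max_num + 1, 0
--     elif array[pos] > el:
--         if pos > 0:
--             if array[pos - 1] < el:
--                 prev = array[pos - 1]
--                 nex = array[pos]
--                 idx = pos
--             else:
--                 prev = 0
--                 nex = array[pos - 1]
--                 idx = pos - 1
--         else:
--             prev = 0
--             nex = array[pos]
--             idx = pos
--     else:
--         if pos < len(array) - 1:
--             if array[pos + 1] > el:
--                 prev = array[pos]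
--                 nex = array[pos + 1]
--                 idx = pos + 1
--             else:
--                 prev = array[pos + 1]
--                 nex = max_num + 1
--                 idx = len(array)
--         else:
--             prev = array[pos]
--             nex = max_num + 1
--             idx = len(array)
--     return (prev, nex, idx)
-- ===== SOURCE B (Python) =====
-- def solution(P, K):
--     # One unordered list of the kept roses; the two neighbours of p are found in a
--     # single linear pass (running max below p / running min above p). No sorted
--     # structure, no binary search, no insertion index.
--     n = len(P)
--     roses = []
--     for i, p in enumerate(P):
--         bef = aft = None
--         for q in roses:
--             if q < p:
--                 if bef is None or q > bef:
--                     bef = q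
--             elif aft is None or q < aft:
--                 aft = q
--         if bef is None:
--             bef = 0
--         if aft is None:
--             aft = n + 1
--         if p - bef - 1 == K or aft - p - 1 == K:
--             return i + 1
--         if (p - bef - 1) + (aft - p - 1) >= K:
--             roses.append(p)
--     return -1
-- ===== Notes on version B (the rewrite author's own statement) =====
-- stated objective: simpler
-- what changed: B drops A's binary search, its nine-branch corner-case tree and the sorted insertion list entirely: it keeps the retained roses in a plain unordered list and reads the two neighbours of p as max/min of the elements below/above p, so the whole find_idx helper disappears.
-- outside the precondition, e.g. on solution([1, 5, 3, 3, 5], 2): A returns 4, B returns -1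
import Mathlib
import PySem

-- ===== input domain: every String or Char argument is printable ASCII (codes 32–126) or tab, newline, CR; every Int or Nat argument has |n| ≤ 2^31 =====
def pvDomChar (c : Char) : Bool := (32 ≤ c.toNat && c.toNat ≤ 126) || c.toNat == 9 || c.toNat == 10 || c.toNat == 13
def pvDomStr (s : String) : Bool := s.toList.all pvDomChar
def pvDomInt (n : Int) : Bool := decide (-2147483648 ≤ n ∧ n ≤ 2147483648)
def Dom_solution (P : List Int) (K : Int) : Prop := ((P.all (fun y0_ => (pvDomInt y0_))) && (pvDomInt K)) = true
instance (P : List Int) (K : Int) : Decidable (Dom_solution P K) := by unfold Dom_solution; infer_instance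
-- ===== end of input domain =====

-- B replaces A's binary search, its corner-case tree and the sorted insertion list by an
-- unordered list of kept roses whose neighbours are read off with max/min filters (objective: simpler).


-- ===== PORT A =====
-- array[pos]: at every call site of pyAt the index is in range (proved in the lemmas below),
-- so the default of pyGetD is never read.
def pyAt (array : List Int) (i : Int) : Int := PySem.List.pyGetD array i 0

-- the 'while max_pos - min_pos > 1' loop of find_idx ('pos = (max_pos + min_pos) // 2')
def findLoopA (el : Int) (array : List Int) (minPos maxPos pos : Int) : Int :=
  if maxPos - minPos > 1 then
    if pyAt array (PySem.Int.floordiv (maxPos + minPos) 2) > el then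
      findLoopA el array minPos (PySem.Int.floordiv (maxPos + minPos) 2)
        (PySem.Int.floordiv (maxPos + minPos) 2)
    else
      findLoopA el array (PySem.Int.floordiv (maxPos + minPos) 2) maxPos
        (PySem.Int.floordiv (maxPos + minPos) 2)
  else pos
termination_by (maxPos - minPos).toNat
decreasing_by
  all_goals
    (have h1 := (PySem.Int.le_floordiv_iff_mul_le
      (a := maxPos + minPos) (b := 2) (q := minPos + 1) (by norm_num)).mpr (by omega)
     have h2 := (PySem.Int.floordiv_lt_iff_lt_mul
      (a := maxPos + minPos) (b := 2) (q := maxPos) (by norm_num)).mpr (by omega)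
     omega)

def findIdxA (el : Int) (array : List Int) (maxNum : Int) : Int × Int × Int :=
  let pos := findLoopA el array 0 (array.length : Int) 0
  if (array.length : Int) = 0 then (0, maxNum + 1, 0)
  else if pyAt array pos > el then
    if pos > 0 then
      if pyAt array (pos - 1) < el then (pyAt array (pos - 1), pyAt array pos, pos)
      else (0, pyAt array (pos - 1), pos - 1)
    else (0, pyAt array pos, pos)
  else
    if pos < (array.length : Int) - 1 then
      if pyAt array (pos + 1) > el then (pyAt array pos, pyAt array (pos + 1), pos + 1)
      else (pyAt array (pos + 1), maxNum + 1, (array.length : Int))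
    else (pyAt array pos, maxNum + 1, (array.length : Int))

def loopA (K n : Int) (ps : List Int) (i : Int) (okLand : List Int) : Int :=
  match ps with
  | [] => -1
  | p :: rest =>
    let r := findIdxA p okLand n
    let diffBef := p - r.1 - 1
    let diffAft := r.2.1 - p - 1
    if diffBef = K ∨ diffAft = K then i + 1
    else if diffBef + diffAft ≥ K then
      loopA K n rest (i + 1)
        (PySem.List.slice okLand none (some r.2.2) ++ [p] ++ PySem.List.slice okLand (some r.2.2) none)
    else loopA K n rest (i + 1) okLand

def solution (P : List Int) (K : Int) : Int := loopA K (P.length : Int) P 0 []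

-- ===== PORT B =====
-- B's inner 'for q in roses' pass: running max below p / running min above p,
-- None-accumulators as in Source B ('if bef is None or q > bef: ...')
def scanB (p : Int) (roses : List Int) (st : Option Int × Option Int) : Option Int × Option Int :=
  roses.foldl (fun st q =>
    if q < p then
      (match st.1 with
       | none => some q
       | some b => if q > b then some q else some b, st.2)
    else
      (st.1, match st.2 with
             | none => some q
             | some a => if q < a then some q else some a)) st

def loopB (K n : Int) (ps : List Int) (i : Int) (roses : List Int) : Int :=
  match ps with
  | [] => -1
  | p :: rest =>
    let st := scanB p roses (none, none)
    let bef := st.1.getD 0        -- 'if bef is None: bef = 0'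
    let aft := st.2.getD (n + 1)  -- 'if aft is None: aft = n + 1'
    if p - bef - 1 = K ∨ aft - p - 1 = K then i + 1
    else loopB K n rest (i + 1)
      (if (p - bef - 1) + (aft - p - 1) ≥ K then roses ++ [p] else roses)

def solution_alt (P : List Int) (K : Int) : Int := loopB K (P.length : Int) P 0 []

-- ===== PRECONDITION & SPEC =====
-- Pre_ excludes lists with duplicate values: there find_idx's stated assumption 'el should not
-- be in array' is violated and A's neighbour values are accidents of the binary-search path,
-- a corner on which no caller could rely.
def Pre_solution (P : List Int) (K : Int) : Prop := P.Nodup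
instance (P : List Int) (K : Int) : Decidable (Pre_solution P K) := by unfold Pre_solution; infer_instance
def pvWitness_solution : List Int × Int := ([2, 5, 1], 1)

def Spec_solution (P : List Int) (K : Int) (out : Int) : Prop := out = solution_alt P K
instance (P : List Int) (K : Int) (out : Int) : Decidable (Spec_solution P K out) := by unfold Spec_solution; infer_instance

-- ===== CLAIM (what is proved, stated in full; the proofs are below) =====
def Claim_equal_solution : Prop := ∀ (P : List Int) (K : Int), Dom_solution P K → Pre_solution P K → Spec_solution P K (solution P K)

-- ===== LEMMAS AND PROOFS =====

def GapSpec (p n : Int) (lA : List Int) (bef aft idx : Int) : Prop :=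
  ∃ c : Int, 0 ≤ c ∧ c ≤ (lA.length : Int) ∧
    (∀ j : Int, 0 ≤ j → j < c → pyAt lA j < p) ∧
    (∀ j : Int, c ≤ j → j < (lA.length : Int) → p < pyAt lA j) ∧
    bef = (if c = 0 then 0 else pyAt lA (c - 1)) ∧
    aft = (if c = (lA.length : Int) then n + 1 else pyAt lA c) ∧
    idx = c

lemma pyAt_getElem (lA : List Int) (j : Nat) (hj : j < lA.length) :
    lA[j] = pyAt lA (j : Int) := by
  rw [pyAt, PySem.List.pyGetD_eq_getElem lA 0 (by omega) (by exact_mod_cast hj)]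
  simp


lemma pyAt_mem (lA : List Int) (j : Int) (h0 : 0 ≤ j) (hL : j < (lA.length : Int)) :
    pyAt lA j ∈ lA :=
  PySem.List.pyGetD_mem lA 0 ⟨by omega, by omega⟩

lemma pyAt_mono (lA : List Int) (hs : lA.Pairwise (· < ·)) (j k : Int)
    (hj : 0 ≤ j) (hjk : j < k) (hk : k < (lA.length : Int)) : pyAt lA j < pyAt lA k := by
  rw [pyAt, PySem.List.pyGetD_eq_getElem lA 0 hj (by omega), pyAt,
    PySem.List.pyGetD_eq_getElem lA 0 (by omega) hk]
  exact List.pairwise_iff_getElem.mp hs _ _ (by omega) (by omega) (by omega)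


lemma maxD_perm (l1 l2 : List Int) (d : Int) (h : l1.Perm l2) :
    PySem.List.maxD l1 (fun x => x) d = PySem.List.maxD l2 (fun x => x) d := by
  unfold PySem.List.maxD
  rcases h1 : PySem.List.max? l1 (fun x => x) with _ | m1
  · have e1 : l1 = [] := (PySem.List.max?_eq_none_iff _ _).mp h1
    have e2 : l2 = [] := (h.symm.trans (e1 ▸ List.Perm.refl _)).eq_nil
    simp [e2, PySem.List.max?]
  · rcases h2 : PySem.List.max? l2 (fun x => x) with _ | m2
    · have e2 : l2 = [] := (PySem.List.max?_eq_none_iff _ _).mp h2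
      have e1 : l1 = [] := (h.trans (e2 ▸ List.Perm.refl _)).eq_nil
      rw [e1] at h1; simp [PySem.List.max?] at h1
    · have hm1 : m1 ∈ l2 := h.mem_iff.mp (PySem.List.max?_mem h1)
      have hm2 : m2 ∈ l1 := h.mem_iff.mpr (PySem.List.max?_mem h2)
      have le1 : m1 ≤ m2 := PySem.List.max?_isMax h2 m1 hm1
      have le2 : m2 ≤ m1 := PySem.List.max?_isMax h1 m2 hm2
      simp [le_antisymm le1 le2]
lemma minD_perm (l1 l2 : List Int) (d : Int) (h : l1.Perm l2) :
    PySem.List.minD l1 (fun x => x) d = PySem.List.minD l2 (fun x => x) d := by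
  unfold PySem.List.minD
  rcases h1 : PySem.List.min? l1 (fun x => x) with _ | m1
  · have e1 : l1 = [] := (PySem.List.min?_eq_none_iff _ _).mp h1
    have e2 : l2 = [] := (h.symm.trans (e1 ▸ List.Perm.refl _)).eq_nil
    simp [e2, PySem.List.min?]
  · rcases h2 : PySem.List.min? l2 (fun x => x) with _ | m2
    · have e2 : l2 = [] := (PySem.List.min?_eq_none_iff _ _).mp h2
      have e1 : l1 = [] := (h.trans (e2 ▸ List.Perm.refl _)).eq_nil
      rw [e1] at h1; simp [PySem.List.min?] at h1
    · have hm1 : m1 ∈ l2 := h.mem_iff.mp (PySem.List.min?_mem h1)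
      have hm2 : m2 ∈ l1 := h.mem_iff.mpr (PySem.List.min?_mem h2)
      have le1 : m1 ≤ m2 := PySem.List.min?_isMin h1 m2 hm2
      have le2 : m2 ≤ m1 := PySem.List.min?_isMin h2 m1 hm1
      simp [le_antisymm le1 le2]

lemma findLoopA_spec (el : Int) (lA : List Int) (hel : el ∉ lA) :
    ∀ (minPos maxPos pos : Int),
      0 ≤ minPos → minPos < maxPos → maxPos ≤ (lA.length : Int) →
      (minPos = 0 ∨ pyAt lA minPos < el) → (maxPos = (lA.length : Int) ∨ el < pyAt lA maxPos) →
      (pos = minPos ∨ pos = maxPos) → 0 ≤ pos → pos < (lA.length : Int) →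
      ∃ mn : Int, 0 ≤ mn ∧ mn + 1 ≤ (lA.length : Int) ∧
        (mn = 0 ∨ pyAt lA mn < el) ∧ (mn + 1 = (lA.length : Int) ∨ el < pyAt lA (mn + 1)) ∧
        (findLoopA el lA minPos maxPos pos = mn ∨ findLoopA el lA minPos maxPos pos = mn + 1) ∧
        0 ≤ findLoopA el lA minPos maxPos pos ∧ findLoopA el lA minPos maxPos pos < (lA.length : Int) := by
  intro minPos maxPos pos
  induction minPos, maxPos, pos using findLoopA.induct el lA with
  | case1 minPos maxPos pos hgt hbr ih =>
    intro h0 hlt hle hmin _hmax _hposor _hpos0 _hposL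
    have hb1 : minPos + 1 ≤ PySem.Int.floordiv (maxPos + minPos) 2 :=
      (PySem.Int.le_floordiv_iff_mul_le (by norm_num)).mpr (by omega)
    have hb2 : PySem.Int.floordiv (maxPos + minPos) 2 < maxPos :=
      (PySem.Int.floordiv_lt_iff_lt_mul (by norm_num)).mpr (by omega)
    rw [findLoopA, if_pos hgt, if_pos hbr]
    exact ih h0 (by omega) (by omega) hmin (Or.inr hbr) (Or.inr rfl) (by omega) (by omega)
  | case2 minPos maxPos pos hgt hbr ih =>
    intro h0 hlt hle _hmin hmax _hposor _hpos0 _hposL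
    have hb1 : minPos + 1 ≤ PySem.Int.floordiv (maxPos + minPos) 2 :=
      (PySem.Int.le_floordiv_iff_mul_le (by norm_num)).mpr (by omega)
    have hb2 : PySem.Int.floordiv (maxPos + minPos) 2 < maxPos :=
      (PySem.Int.floordiv_lt_iff_lt_mul (by norm_num)).mpr (by omega)
    have hmem : pyAt lA (PySem.Int.floordiv (maxPos + minPos) 2) ∈ lA :=
      PySem.List.pyGetD_mem lA 0 ⟨by omega, by omega⟩
    have hlt' : pyAt lA (PySem.Int.floordiv (maxPos + minPos) 2) < el :=
      lt_of_le_of_ne (not_lt.mp hbr) (fun he => hel (he ▸ hmem))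
    rw [findLoopA, if_pos hgt, if_neg hbr]
    exact ih (by omega) (by omega) hle (Or.inr hlt') hmax (Or.inl rfl) (by omega) (by omega)
  | case3 minPos maxPos pos hngt =>
    intro h0 hlt hle hmin hmax hposor hpos0 hposL
    rw [findLoopA, if_neg hngt]
    refine ⟨minPos, h0, by omega, hmin, ?_, by omega, hpos0, hposL⟩
    rcases hmax with h | h
    · exact Or.inl (by omega)
    · exact Or.inr (by rw [show minPos + 1 = maxPos by omega]; exact h)

lemma findIdxA_spec (p n : Int) (lA : List Int) (hs : lA.Pairwise (· < ·)) (hel : p ∉ lA) :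
    GapSpec p n lA (findIdxA p lA n).1 (findIdxA p lA n).2.1 (findIdxA p lA n).2.2 := by
  have hmono : ∀ j k : Int, 0 ≤ j → j < k → k < (lA.length : Int) → pyAt lA j < pyAt lA k := by
    intro j k hj hjk hk
    rw [pyAt, PySem.List.pyGetD_eq_getElem lA 0 hj (by omega), pyAt,
      PySem.List.pyGetD_eq_getElem lA 0 (by omega) hk]
    exact List.pairwise_iff_getElem.mp hs _ _ (by omega) (by omega) (by omega)
  have hne : ∀ j : Int, 0 ≤ j → j < (lA.length : Int) → pyAt lA j ≠ p := by
    intro j hj hjL he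
    exact hel (he ▸ PySem.List.pyGetD_mem lA 0 ⟨by omega, by omega⟩)
  rcases eq_or_ne lA.length 0 with hL0 | hL0
  · have hnil : lA = [] := List.length_eq_zero_iff.mp hL0
    subst hnil
    have hv : findIdxA p [] n = (0, n + 1, 0) := by simp [findIdxA]
    rw [hv]
    exact ⟨0, le_rfl, by simp, by intro j hj hj0; omega,
      by intro j hj hjL; simp at hjL; omega, by simp, by simp, rfl⟩
  · obtain ⟨mn, hmn0, hmnL, hmnlo, hmnhi, hro, hr0, hrL⟩ :=
      findLoopA_spec p lA hel 0 (lA.length : Int) 0 le_rfl (by omega) le_rfl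
        (Or.inl rfl) (Or.inl rfl) (Or.inl rfl) le_rfl (by omega)
    unfold GapSpec
    simp only [findIdxA]
    set r := findLoopA p lA 0 (lA.length : Int) 0 with hrdef
    rw [if_neg (show ¬((lA.length : Int) = 0) by omega)]
    split_ifs with h1 h2 h3 h4 h5
    · -- pyAt r > p, r > 0, pyAt (r-1) < p : c = r
      refine ⟨r, hr0, by omega, ?_, ?_, ?_, ?_, rfl⟩
      · intro j hj hjr
        rcases eq_or_lt_of_le (show j ≤ r - 1 by omega) with he | hlt2
        · rw [he]; exact h3
        · exact lt_trans (hmono j (r - 1) hj hlt2 (by omega)) h3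
      · intro j hjr hjL
        rcases eq_or_lt_of_le hjr with he | hlt2
        · rw [← he]; exact h1
        · exact lt_trans h1 (hmono r j hr0 hlt2 hjL)
      · rw [if_neg (show ¬(r = 0) by omega)]
      · rw [if_neg (show ¬(r = (lA.length : Int)) by omega)]
    · -- pyAt r > p, r > 0, ¬(pyAt (r-1) < p) : then r = 1, c = 0
      have h3' : p < pyAt lA (r - 1) :=
        lt_of_le_of_ne (not_lt.mp h3) (fun he => hne (r - 1) (by omega) (by omega) he.symm)
      have hrmn : r = mn + 1 := by
        rcases hro with h | h
        · rcases hmnlo with h' | h'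
          · omega
          · rw [h] at h1; exact absurd h1 (lt_asymm h')
        · exact h
      have hmn0' : mn = 0 := by
        rcases hmnlo with h' | h'
        · exact h'
        · rw [show mn = r - 1 by omega] at h'; exact absurd h' (lt_asymm h3')
      refine ⟨0, le_rfl, by omega, by intro j hj hj0; omega, ?_, by simp,
        ?_, by show r - 1 = (0 : Int); omega⟩
      · intro j hj hjL
        rcases eq_or_lt_of_le hj with he | hlt2
        · rw [← he]; rw [show (r : Int) - 1 = 0 by omega] at h3'; exact h3'
        · rw [show (r : Int) - 1 = 0 by omega] at h3'
          exact lt_trans h3' (hmono 0 j le_rfl hlt2 hjL)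
      · rw [if_neg (show ¬((0 : Int) = (lA.length : Int)) by omega),
          show (r : Int) - 1 = 0 by omega]
    · -- pyAt r > p, ¬(r > 0) : r = 0, c = 0
      refine ⟨0, le_rfl, by omega, by intro j hj hj0; omega, ?_, by simp,
        ?_, by show r = (0 : Int); omega⟩
      · intro j hj hjL
        rcases eq_or_lt_of_le hj with he | hlt2
        · rw [← he, show (0 : Int) = r by omega]; exact h1
        · rw [show (0 : Int) = r by omega] at hlt2
          exact lt_trans h1 (hmono r j hr0 hlt2 hjL)
      · rw [if_neg (show ¬((0 : Int) = (lA.length : Int)) by omega), show (0 : Int) = r by omega]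
    · -- ¬(pyAt r > p), r < L - 1, pyAt (r+1) > p : c = r + 1
      have h1' : pyAt lA r < p := lt_of_le_of_ne (not_lt.mp h1) (hne r hr0 hrL)
      refine ⟨r + 1, by omega, by omega, ?_, ?_, ?_, ?_, rfl⟩
      · intro j hj hjr
        rcases eq_or_lt_of_le (show j ≤ r by omega) with he | hlt2
        · rw [he]; exact h1'
        · exact lt_trans (hmono j r hj hlt2 hrL) h1'
      · intro j hjr hjL
        rcases eq_or_lt_of_le hjr with he | hlt2
        · rw [← he]; exact h5
        · exact lt_trans h5 (hmono (r + 1) j (by omega) hlt2 hjL)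
      · rw [if_neg (show ¬(r + 1 = 0) by omega), show (r : Int) + 1 - 1 = r by omega]
      · rw [if_neg (show ¬(r + 1 = (lA.length : Int)) by omega)]
    · -- ¬(pyAt r > p), r < L - 1, ¬(pyAt (r+1) > p) : impossible
      have h1' : pyAt lA r < p := lt_of_le_of_ne (not_lt.mp h1) (hne r hr0 hrL)
      have h5' : pyAt lA (r + 1) < p :=
        lt_of_le_of_ne (not_lt.mp h5) (hne (r + 1) (by omega) (by omega))
      exfalso
      rcases hro with h | h
      · rcases hmnhi with h' | h'
        · omega
        · rw [← h] at h'; exact absurd h' (lt_asymm h5')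
      · rcases hmnhi with h' | h'
        · omega
        · rw [show mn + 1 = r by omega] at h'; exact absurd h' (lt_asymm h1')
    · -- ¬(pyAt r > p), ¬(r < L - 1) : r = L - 1, c = L
      have h1' : pyAt lA r < p := lt_of_le_of_ne (not_lt.mp h1) (hne r hr0 hrL)
      refine ⟨(lA.length : Int), by omega, le_rfl, ?_, by intro j hjL hjL'; omega, ?_,
        by rw [if_pos rfl], rfl⟩
      · intro j hj hjL
        rcases eq_or_lt_of_le (show j ≤ r by omega) with he | hlt2
        · rw [he]; exact h1'
        · exact lt_trans (hmono j r hj hlt2 hrL) h1'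
      · rw [if_neg (show ¬((lA.length : Int) = 0) by omega),
          show (lA.length : Int) - 1 = r by omega]

lemma bvals (p n c : Int) (lA lB : List Int) (hs : lA.Pairwise (· < ·))
    (hperm : lA.Perm lB) (hc0 : 0 ≤ c) (hcL : c ≤ (lA.length : Int))
    (hbelow : ∀ j : Int, 0 ≤ j → j < c → pyAt lA j < p)
    (habove : ∀ j : Int, c ≤ j → j < (lA.length : Int) → p < pyAt lA j) :
    PySem.List.maxD (lB.filter (fun q => decide (q < p))) (fun x => x) 0
      = (if c = 0 then 0 else pyAt lA (c - 1)) ∧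
    PySem.List.minD (lB.filter (fun q => decide (p < q))) (fun x => x) (n + 1)
      = (if c = (lA.length : Int) then n + 1 else pyAt lA c) := by
  constructor
  · rw [maxD_perm _ (lA.filter (fun q => decide (q < p))) 0 ((hperm.filter _).symm)]
    by_cases hc : c = 0
    · rw [if_pos hc]
      have hfil : lA.filter (fun q => decide (q < p)) = [] := by
        rw [List.filter_eq_nil_iff]
        intro q hq hd
        obtain ⟨j, hj, rfl⟩ := List.mem_iff_getElem.mp hq
        have h2 := habove (j : Int) (by omega) (by omega)
        rw [← pyAt_getElem lA j hj] at h2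
        simp at hd
        omega
      rw [hfil]; simp [PySem.List.maxD, PySem.List.max?]
    · rw [if_neg hc]
      have hmem : pyAt lA (c - 1) ∈ lA.filter (fun q => decide (q < p)) :=
        List.mem_filter.mpr ⟨pyAt_mem lA (c - 1) (by omega) (by omega),
          by simpa using hbelow (c - 1) (by omega) (by omega)⟩
      rcases h2 : PySem.List.max? (lA.filter (fun q => decide (q < p))) (fun x => x) with _ | m'
      · rw [PySem.List.max?_eq_none_iff] at h2; rw [h2] at hmem; simp at hmem
      · have hle1 : pyAt lA (c - 1) ≤ m' := by simpa using PySem.List.max?_isMax h2 _ hmem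
        obtain ⟨hm'A, hm'lt⟩ := List.mem_filter.mp (PySem.List.max?_mem h2)
        simp only [decide_eq_true_eq] at hm'lt
        obtain ⟨j, hj, he⟩ := List.mem_iff_getElem.mp hm'A
        have hpj : pyAt lA (j : Int) = m' := by rw [← pyAt_getElem lA j hj]; exact he
        have hjc : (j : Int) < c := by
          by_contra hcon
          exact absurd (hpj ▸ habove (j : Int) (by omega) (by omega)) (lt_asymm hm'lt)
        have hle2 : m' ≤ pyAt lA (c - 1) := by
          rcases eq_or_lt_of_le (show (j : Int) ≤ c - 1 by omega) with heq | hlt2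
          · rw [← heq, hpj]
          · rw [← hpj]
            exact le_of_lt (pyAt_mono lA hs _ _ (by omega) hlt2 (by omega))
        rw [PySem.List.maxD, h2]
        exact le_antisymm hle2 hle1
  · rw [minD_perm _ (lA.filter (fun q => decide (p < q))) (n + 1) ((hperm.filter _).symm)]
    by_cases hc : c = (lA.length : Int)
    · rw [if_pos hc]
      have hfil : lA.filter (fun q => decide (p < q)) = [] := by
        rw [List.filter_eq_nil_iff]
        intro q hq hd
        obtain ⟨j, hj, rfl⟩ := List.mem_iff_getElem.mp hq
        have h2 := hbelow (j : Int) (by omega) (by omega)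
        rw [← pyAt_getElem lA j hj] at h2
        simp at hd
        omega
      rw [hfil]; simp [PySem.List.minD, PySem.List.min?]
    · rw [if_neg hc]
      have hmem : pyAt lA c ∈ lA.filter (fun q => decide (p < q)) :=
        List.mem_filter.mpr ⟨pyAt_mem lA c (by omega) (by omega),
          by simpa using habove c le_rfl (by omega)⟩
      rcases h2 : PySem.List.min? (lA.filter (fun q => decide (p < q))) (fun x => x) with _ | m'
      · rw [PySem.List.min?_eq_none_iff] at h2; rw [h2] at hmem; simp at hmem
      · have hle1 : m' ≤ pyAt lA c := by simpa using PySem.List.min?_isMin h2 _ hmem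
        obtain ⟨hm'A, hm'lt⟩ := List.mem_filter.mp (PySem.List.min?_mem h2)
        simp only [decide_eq_true_eq] at hm'lt
        obtain ⟨j, hj, he⟩ := List.mem_iff_getElem.mp hm'A
        have hpj : pyAt lA (j : Int) = m' := by rw [← pyAt_getElem lA j hj]; exact he
        have hjc : c ≤ (j : Int) := by
          by_contra hcon
          exact absurd (hpj ▸ hbelow (j : Int) (by omega) (by omega)) (lt_asymm hm'lt)
        have hle2 : pyAt lA c ≤ m' := by
          rcases eq_or_lt_of_le hjc with heq | hlt2
          · rw [heq, hpj]
          · rw [← hpj]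
            exact le_of_lt (pyAt_mono lA hs _ _ (by omega) hlt2 (by omega))
        rw [PySem.List.minD, h2]
        exact le_antisymm hle1 hle2

lemma insert_sorted (p c : Int) (lA : List Int) (hs : lA.Pairwise (· < ·))
    (hc0 : 0 ≤ c) (hcL : c ≤ (lA.length : Int))
    (hbelow : ∀ j : Int, 0 ≤ j → j < c → pyAt lA j < p)
    (habove : ∀ j : Int, c ≤ j → j < (lA.length : Int) → p < pyAt lA j) :
    ((lA.take c.toNat ++ [p]) ++ lA.drop c.toNat).Pairwise (· < ·) := by
  have htake : ∀ x ∈ lA.take c.toNat, x < p := by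
    intro x hx
    obtain ⟨j, hj, rfl⟩ := List.mem_take_iff_getElem.mp hx
    rw [pyAt_getElem lA j (by omega)]
    exact hbelow (j : Int) (by omega) (by omega)
  have hdrop : ∀ y ∈ lA.drop c.toNat, p < y := by
    intro y hy
    obtain ⟨j, hj, rfl⟩ := List.mem_drop_iff_getElem.mp hy
    rw [pyAt_getElem lA _ (by omega)]
    exact habove ((c.toNat + j : Nat) : Int) (by omega) (by omega)
  rw [List.pairwise_append]
  refine ⟨?_, hs.sublist (List.drop_sublist _ _), ?_⟩
  · rw [List.pairwise_append]
    exact ⟨hs.sublist (List.take_sublist _ _), by simp,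
      fun x hx y hy => by simp at hy; rw [hy]; exact htake x hx⟩
  · intro x hx y hy
    rcases List.mem_append.mp hx with hx' | hx'
    · exact lt_trans (htake x hx') (hdrop y hy)
    · simp at hx'; rw [hx']; exact hdrop y hy

lemma insert_perm (p : Int) (k : Nat) (lA lB : List Int) (hperm : lA.Perm lB) :
    ((lA.take k ++ [p]) ++ lA.drop k).Perm (lB ++ [p]) := by
  have h1 : (lA.take k ++ [p]) ++ lA.drop k = lA.take k ++ p :: lA.drop k := by simp
  rw [h1]
  refine List.perm_middle.trans ?_
  rw [List.take_append_drop]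
  exact (hperm.cons p).trans (List.perm_append_singleton p lB).symm

lemma insert_mem (p : Int) (k : Nat) (lA : List Int) (x : Int)
    (hx : x ∈ (lA.take k ++ [p]) ++ lA.drop k) : x = p ∨ x ∈ lA := by
  rcases List.mem_append.mp hx with h | h
  · rcases List.mem_append.mp h with h' | h'
    · exact Or.inr (List.mem_of_mem_take h')
    · simp at h'; exact Or.inl h'
  · exact Or.inr (List.mem_of_mem_drop h)

lemma scan_split (p : Int) : ∀ (roses : List Int) (b a : Option Int), p ∉ roses →
    scanB p roses (b, a) =
      ((roses.filter (fun q => decide (q < p))).foldl (fun acc q =>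
          match acc with
          | none => some q
          | some m => if q > m then some q else some m) b,
       (roses.filter (fun q => decide (p < q))).foldl (fun acc q =>
          match acc with
          | none => some q
          | some m => if q < m then some q else some m) a) := by
  intro roses
  induction roses with
  | nil => intro b a _; rfl
  | cons q roses ih =>
    intro b a hp
    have hqp : q ≠ p := fun h => hp (h ▸ List.mem_cons_self)
    by_cases hlt : q < p
    · rw [show scanB p (q :: roses) (b, a) = scanB p roses
        ((match b with | none => some q | some b' => if q > b' then some q else some b'), a) by
          simp [scanB, List.foldl_cons, if_pos hlt]]
      rw [ih _ _ (fun h => hp (List.mem_cons_of_mem _ h))]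
      simp [hlt, show ¬(p < q) by omega]
    · have hgt : p < q := by rcases lt_or_gt_of_ne hqp with h | h; omega; omega
      rw [show scanB p (q :: roses) (b, a) = scanB p roses
        (b, (match a with | none => some q | some a' => if q < a' then some q else some a')) by
          simp [scanB, List.foldl_cons, if_neg hlt]]
      rw [ih _ _ (fun h => hp (List.mem_cons_of_mem _ h))]
      simp [hlt, hgt]

lemma scan_maxmin (p : Int) (roses : List Int) (hp : p ∉ roses) :
    scanB p roses (none, none) =
      (PySem.List.max? (roses.filter (fun q => decide (q < p))) (fun x => x),
       PySem.List.min? (roses.filter (fun q => decide (p < q))) (fun x => x)) := by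
  rw [scan_split p roses none none hp]
  simp only [Prod.mk.injEq]
  constructor
  · unfold PySem.List.max?
    congr 1
    funext acc q
    cases acc
    · rfl
    · simp [gt_iff_lt]
  · unfold PySem.List.min?
    congr 1
    funext acc q
    cases acc
    · rfl
    · simp

lemma loopA_eq_loopB (K n : Int) :
    ∀ (ps : List Int) (i : Int) (lA lB : List Int),
      lA.Pairwise (· < ·) → lA.Perm lB → (∀ q ∈ ps, q ∉ lA) → ps.Nodup →
      loopA K n ps i lA = loopB K n ps i lB := by
  intro ps
  induction ps with
  | nil => intro i lA lB _ _ _ _; rfl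
  | cons p rest ih =>
    intro i lA lB hs hperm hnotin hnd
    obtain ⟨c, hc0, hcL, hbelow, habove, hbef, haft, hidx⟩ :=
      findIdxA_spec p n lA hs (hnotin p (List.mem_cons_self))
    obtain ⟨hbv, hav⟩ := bvals p n c lA lB hs hperm hc0 hcL hbelow habove
    unfold PySem.List.maxD at hbv
    unfold PySem.List.minD at hav
    have hpB : p ∉ lB := fun h => hnotin p List.mem_cons_self (hperm.mem_iff.mpr h)
    simp only [loopA, loopB, scan_maxmin p lB hpB]
    rw [hbef, haft, hidx, hbv, hav]
    set befv := (if c = 0 then (0 : Int) else pyAt lA (c - 1)) with hbefv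
    set aftv := (if c = (lA.length : Int) then n + 1 else pyAt lA c) with haftv
    split_ifs with h1 h2
    · rfl
    · rw [PySem.List.slice_to lA hc0, PySem.List.slice_from lA hc0]
      exact ih (i + 1) _ (lB ++ [p])
        (insert_sorted p c lA hs hc0 hcL hbelow habove)
        (insert_perm p c.toNat lA lB hperm)
        (fun q hq hmem => by
          rcases insert_mem p c.toNat lA q hmem with he | hin
          · exact (List.nodup_cons.mp hnd).1 (he ▸ hq)
          · exact hnotin q (List.mem_cons_of_mem _ hq) hin)
        (List.nodup_cons.mp hnd).2
    · exact ih (i + 1) lA lB hs hperm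
        (fun q hq => hnotin q (List.mem_cons_of_mem _ hq)) (List.nodup_cons.mp hnd).2

-- ===== VERDICT (by name: the statement is the Claim_ definition above) =====
theorem solution_spec : Claim_equal_solution := by
  intro P K _hD hPre
  unfold Spec_solution solution solution_alt
  exact loopA_eq_loopB K (P.length : Int) P 0 [] [] (by simp) (List.Perm.refl _) (by simp) hPre
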